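-- pv_equiv track=rewrite | github.com/tsaol/aws-gpu | scripts/utils.py | group_by_family
-- ===== SOURCE A (Python) =====
-- from typing import Dict, List, Any, Optional
--
-- def group_by_family(instances: List[Dict]) -> Dict[str, List[Dict]]:
--     """按系列分组实例"""
--     families = {}
--     for inst in instances:
--         family = inst['name'].split('.')[0]
--         if family not in families:
--             families[family] = []
--         families[family].append(inst)
--     return families
-- ===== SOURCE B (Python) =====
-- def group_by_family(instances):
--     keys = []
--     for inst in instances:
--         k = inst['name'].split('.')[0]
--         if k not in keys:
--             keys.append(k)
--     return {k: [inst for inst in instances if inst['name'].split('.')[0] == k] for k in keys}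
-- ===== Notes on version B (the rewrite author's own statement) =====
-- stated objective: alternative
-- what changed: B replaces A's single-pass dict partition (create-empty-then-append per element) by a two-phase scheme: one pass collects the distinct family keys in first-appearance order, then a dict comprehension builds each group with a per-key filter over the whole list.
import Mathlib
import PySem

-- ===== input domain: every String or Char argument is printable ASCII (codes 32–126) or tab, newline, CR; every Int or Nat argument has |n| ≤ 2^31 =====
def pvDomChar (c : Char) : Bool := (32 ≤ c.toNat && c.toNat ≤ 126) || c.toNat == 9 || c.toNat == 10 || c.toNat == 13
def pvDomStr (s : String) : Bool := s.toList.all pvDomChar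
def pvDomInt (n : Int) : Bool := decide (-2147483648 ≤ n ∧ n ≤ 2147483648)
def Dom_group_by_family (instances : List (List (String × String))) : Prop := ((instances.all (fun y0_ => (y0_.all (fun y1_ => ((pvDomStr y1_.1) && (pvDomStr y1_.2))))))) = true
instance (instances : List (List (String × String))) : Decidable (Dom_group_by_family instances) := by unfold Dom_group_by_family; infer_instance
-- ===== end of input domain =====

-- B groups by a distinct-keys pass plus a per-key filter instead of A's one-pass dict partition; same return value.

-- shared expression inst['name'].split('.')[0]; split('.') never raises (sep nonempty) and never
-- yields an empty list, so the .getD []/.headD "" defaults are never taken; under Pre_ the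
-- 'name' lookup succeeds, so its .getD "" default is never taken either
def famKey (inst : List (String × String)) : String :=
  ((PySem.Str.split? ((List.lookup "name" inst).getD "") ".").getD []).headD ""

-- ===== PORT A =====
def group_by_family (instances : List (List (String × String))) : List (String × List (List (String × String))) :=
  (instances.foldl (fun families inst =>
    let family := famKey inst
    let families := if families.contains family then families else families.insert family []
    families.modify family [] (fun l => l ++ [inst]))
    (PySem.Dict.empty : PySem.Dict String (List (List (String × String))))).items

-- ===== PORT B =====
def group_by_family_alt (instances : List (List (String × String))) : List (String × List (List (String × String))) :=
  let keys := instances.foldl (fun ks inst =>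
    let k := famKey inst
    if k ∈ ks then ks else ks ++ [k]) []
  keys.map (fun k => (k, instances.filter (fun inst => famKey inst == k)))

-- ===== PRECONDITION & SPEC =====
-- Pre_ excludes exactly the inputs where some instance lacks the key 'name': there A (and B) raise KeyError.
def Pre_group_by_family (instances : List (List (String × String))) : Prop :=
  (instances.all (fun inst => (List.lookup "name" inst).isSome)) = true
instance (instances : List (List (String × String))) : Decidable (Pre_group_by_family instances) := by unfold Pre_group_by_family; infer_instance
def pvWitness_group_by_family : (List (List (String × String))) :=
  [[("name", "m5.large")], [("name", "c5.xlarge")], [("name", "m5.xlarge")]]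
def Spec_group_by_family (instances : List (List (String × String))) (out : List (String × List (List (String × String)))) : Prop := out = group_by_family_alt instances
instance (instances : List (List (String × String))) (out : List (String × List (List (String × String)))) : Decidable (Spec_group_by_family instances out) := by unfold Spec_group_by_family; infer_instance

-- ===== CLAIM (what is proved, stated in full; the proofs are below) =====
def Claim_equal_group_by_family : Prop := ∀ (instances : List (List (String × String))), Dom_group_by_family instances → Pre_group_by_family instances → Spec_group_by_family instances (group_by_family instances)

-- ===== LEMMAS AND PROOFS =====

-- A's loop body (insert-empty-if-new, then append) is one 'modify' with default []
theorem step_eq_modify (d : PySem.Dict String (List (List (String × String)))) (k : String)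
    (f : List (List (String × String)) → List (List (String × String))) :
    (if d.contains k then d else d.insert k []).modify k [] f = d.modify k [] f := by
  by_cases h : d.contains k
  · simp [h]
  · simp only [h]
    show (d.insert k []).insert k (f ((d.insert k []).getD k [])) = d.insert k (f (d.getD k []))
    rw [PySem.Dict.getD_insert_self, PySem.Dict.insert_insert_self,
        PySem.Dict.getD_of_not_contains d [] (by simpa using h)]

theorem dict_eq (instances : List (List (String × String))) :
    (instances.foldl (fun families inst =>
      let family := famKey inst
      let families := if families.contains family then families else families.insert family []
      families.modify family [] (fun l => l ++ [inst]))
      (PySem.Dict.empty : PySem.Dict String (List (List (String × String)))))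
    = instances.foldl (fun d i => d.modify (famKey i) [] (fun l => l ++ [i])) PySem.Dict.empty := by
  congr 1
  funext d i
  exact step_eq_modify d (famKey i) _

theorem keys_eq (instances : List (List (String × String))) :
    (instances.foldl (fun d i => d.modify (famKey i) [] (fun l => l ++ [i]))
      (PySem.Dict.empty : PySem.Dict String (List (List (String × String))))).keys
    = PySem.Set.ofList (instances.map famKey) := by
  rw [PySem.Dict.keys_foldl_modify_key]
  simp [PySem.Set.update_nil_left]

theorem getD_eq (instances : List (List (String × String))) (k : String) :
    (instances.foldl (fun d i => d.modify (famKey i) [] (fun l => l ++ [i]))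
      (PySem.Dict.empty : PySem.Dict String (List (List (String × String))))).getD k []
    = instances.filter (fun i => famKey i == k) := by
  have h := PySem.Dict.getD_foldl_modify_append
    (l := instances.map (fun i => (famKey i, i)))
    (d := (PySem.Dict.empty : PySem.Dict String (List (List (String × String))))) (c := k)
  rw [List.foldl_map] at h
  simpa [List.filter_map, Function.comp_def] using h

theorem bkeys_eq (instances : List (List (String × String))) :
    (instances.foldl (fun ks inst =>
      let k := famKey inst
      if k ∈ ks then ks else ks ++ [k]) [])
    = PySem.Set.ofList (instances.map famKey) := by
  have h := PySem.Set.update_map_eq_foldl_add (s := ([] : List String)) (l := instances) (f := famKey)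
  rw [PySem.Set.update_nil_left] at h
  rw [show (fun (ks : List String) inst =>
        let k := famKey inst
        if k ∈ ks then ks else ks ++ [k]) = (fun s b => PySem.Set.add s (famKey b)) from by
      funext ks i
      by_cases hm : famKey i ∈ ks <;> simp [PySem.Set.add, hm]]
  exact h.symm

-- ===== VERDICT (by name: the statement is the Claim_ definition above) =====
theorem group_by_family_spec : Claim_equal_group_by_family := by
  intro instances _ _
  show group_by_family instances = group_by_family_alt instances
  unfold group_by_family group_by_family_alt
  rw [dict_eq, bkeys_eq]
  rw [PySem.Dict.items_eq_map_keys _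
    (PySem.Dict.nodup_keys_foldl_modify_key instances famKey [] _ _ PySem.Dict.nodup_keys_empty) []]
  rw [keys_eq]
  exact List.map_congr_left (fun k _ => by rw [getD_eq])
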